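-- pv_equiv track=rewrite | github.com/sfeir-open-source/sfeir-school-airflow | update_slides.py | create_js_content
-- ===== SOURCE A (Python) =====
-- def get_clean_chapter_name(str):
--   chapter_name_parts = str.split('-')
--   return chapter_name_parts[1] + ''.join(part.capitalize() for part in chapter_name_parts[2:])
--
-- def create_js_content(slides_tree, slides_dir):
--   file_content = f'// One method per module\n'
--   for chapter in slides_tree:
--     file_content += (
--       f'function {get_clean_chapter_name(chapter)}() {{\n'
--       f'  return [\n'
--     )
--
--     for filename in slides_tree[chapter]:
--       file_content += f'    \'{chapter}/{filename}\',\n'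
--
--     file_content += (
--       f'  ];\n'
--       f'}}\n\n'
--     )
--
--   file_content += (
--     f'function formation() {{\n'
--     f'  return [\n'
--   )
--
--   for chapter in slides_tree:
--     file_content += f'    ...{get_clean_chapter_name(chapter)}(),\n'
--
--   file_content += (f'  ].map(slidePath => {{\n'
--                    f'    return {{ path: slidePath }};\n'
--                    f'  }});\n'
--                    f'}}\n\n'
--                    f'export function usedSlides() {{\n'
--                    f'  return formation();\n'
--                    f'}}\n'
--                    )
--   return file_content
-- ===== SOURCE B (Python) =====
-- def create_js_content(slides_tree, slides_dir):
--   func_blocks = []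
--   spreads = []
--   for chapter, filenames in slides_tree.items():
--     parts = chapter.split('-')
--     name = parts[1] + ''.join(part.capitalize() for part in parts[2:])
--     body = ''.join(f'    \'{chapter}/{filename}\',\n' for filename in filenames)
--     func_blocks.append(f'function {name}() {{\n  return [\n{body}  ];\n}}\n\n')
--     spreads.append(f'    ...{name}(),\n')
--   return (
--     '// One method per module\n'
--     + ''.join(func_blocks)
--     + 'function formation() {\n  return [\n'
--     + ''.join(spreads)
--     + '  ].map(slidePath => {\n'
--       '    return { path: slidePath };\n'
--       '  });\n'
--       '}\n\n'
--       'export function usedSlides() {\n'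
--       '  return formation();\n'
--       '}\n'
--   )
-- ===== Notes on version B (the rewrite author's own statement) =====
-- stated objective: alternative
-- what changed: B makes one pass over slides_tree collecting the function blocks and the spread lines into two lists and joins them once, instead of A's two separate passes that repeatedly concatenate onto one growing string.
import Mathlib
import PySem

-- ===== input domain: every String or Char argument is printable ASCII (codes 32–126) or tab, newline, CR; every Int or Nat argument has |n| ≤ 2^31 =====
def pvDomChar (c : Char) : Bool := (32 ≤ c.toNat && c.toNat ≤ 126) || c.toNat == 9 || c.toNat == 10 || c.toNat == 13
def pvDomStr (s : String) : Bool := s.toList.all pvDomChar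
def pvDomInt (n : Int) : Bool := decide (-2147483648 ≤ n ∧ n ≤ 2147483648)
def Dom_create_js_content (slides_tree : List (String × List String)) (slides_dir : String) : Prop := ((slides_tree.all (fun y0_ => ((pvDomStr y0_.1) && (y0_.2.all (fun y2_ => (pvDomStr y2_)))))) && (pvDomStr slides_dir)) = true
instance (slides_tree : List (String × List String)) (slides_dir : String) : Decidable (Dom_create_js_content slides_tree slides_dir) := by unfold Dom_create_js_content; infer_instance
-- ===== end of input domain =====

-- B assembles the file in ONE pass over the tree, collecting the function blocks and the spread
-- lines into two lists and joining them once, instead of A's two passes with repeated string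
-- concatenation (objective: alternative decomposition; return value only — neither mutates input).

-- ===== PORT A =====
-- str.capitalize(): first char uppercased, rest lowered; ported by hand (exact on the ASCII domain).
def pyCapitalize (cs : List Char) : List Char :=
  match cs with
  | [] => []
  | c :: rest => PySem.Chars.upperChar c :: PySem.Chars.lower rest

def get_clean_chapter_name (s : String) : String :=
  let parts := PySem.Chars.splitOn s.toList ['-']
  -- parts[1] raises IndexError when the name has no '-'; Pre_ excludes that, pyGetD totalizes
  String.ofList (PySem.List.pyGetD parts 1 [] ++
             PySem.Chars.join [] ((PySem.List.slice parts (some 2) none).map pyCapitalize))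

def create_js_content (slides_tree : List (String × List String)) (slides_dir : String) : String :=
  let d := PySem.Dict.mk slides_tree
  let fc := "// One method per module\n"
  let fc := d.keys.foldl (fun acc chapter =>
      let acc := acc ++ "function " ++ get_clean_chapter_name chapter ++ "() {\n  return [\n"
      let acc := (d.getD chapter []).foldl
        (fun a filename => a ++ "    '" ++ chapter ++ "/" ++ filename ++ "',\n") acc
      acc ++ "  ];\n}\n\n") fc
  let fc := fc ++ "function formation() {\n  return [\n"
  let fc := d.keys.foldl (fun acc chapter =>
      acc ++ "    ..." ++ get_clean_chapter_name chapter ++ "(),\n") fc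
  fc ++ "  ].map(slidePath => {\n    return { path: slidePath };\n  });\n}\n\nexport function usedSlides() {\n  return formation();\n}\n"

-- ===== PORT B =====
def create_js_content_alt (slides_tree : List (String × List String)) (slides_dir : String) : String :=
  let acc := slides_tree.foldl (fun (p : List String × List String) cf =>
      let parts := PySem.Chars.splitOn cf.1.toList ['-']
      let name := String.ofList (PySem.List.pyGetD parts 1 [] ++
                  PySem.Chars.join [] ((PySem.List.slice parts (some 2) none).map pyCapitalize))
      let body := PySem.Str.join ""
        (cf.2.map (fun filename => "    '" ++ cf.1 ++ "/" ++ filename ++ "',\n"))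
      (p.1 ++ ["function " ++ name ++ "() {\n  return [\n" ++ body ++ "  ];\n}\n\n"],
       p.2 ++ ["    ..." ++ name ++ "(),\n"])) ([], [])
  "// One method per module\n"
    ++ PySem.Str.join "" acc.1
    ++ "function formation() {\n  return [\n"
    ++ PySem.Str.join "" acc.2
    ++ "  ].map(slidePath => {\n    return { path: slidePath };\n  });\n}\n\nexport function usedSlides() {\n  return formation();\n}\n"

-- ===== PRECONDITION & SPEC =====
-- Pre_ excludes (a) chapter names without '-', on which A raises IndexError (parts[1]), and
-- (b) association lists with duplicate keys, which no Python dict can denote (A iterates the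
-- dict's distinct keys with first-match lookup, an accident of the encoding).
def Pre_create_js_content (slides_tree : List (String × List String)) (slides_dir : String) : Prop :=
  (slides_tree.map Prod.fst).Nodup ∧ ∀ p ∈ slides_tree, '-' ∈ p.1.toList
instance (slides_tree : List (String × List String)) (slides_dir : String) : Decidable (Pre_create_js_content slides_tree slides_dir) := by unfold Pre_create_js_content; infer_instance

def pvWitness_create_js_content : (List (String × List String)) × String :=
  ([("01-intro-deck", ["s1.md", "s2.md"]), ("02-next", ["s3.md"])], "slides")

def Spec_create_js_content (slides_tree : List (String × List String)) (slides_dir : String) (out : String) : Prop := out = create_js_content_alt slides_tree slides_dir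
instance (slides_tree : List (String × List String)) (slides_dir : String) (out : String) : Decidable (Spec_create_js_content slides_tree slides_dir out) := by unfold Spec_create_js_content; infer_instance

-- ===== CLAIM (what is proved, stated in full; the proofs are below) =====
def Claim_equal_create_js_content : Prop := ∀ (slides_tree : List (String × List String)) (slides_dir : String), Dom_create_js_content slides_tree slides_dir → Pre_create_js_content slides_tree slides_dir → Spec_create_js_content slides_tree slides_dir (create_js_content slides_tree slides_dir)

-- ===== LEMMAS AND PROOFS =====

-- canonical per-chapter pieces both programs produce
def blockOf (p : String × List String) : String :=
  "function " ++ get_clean_chapter_name p.1 ++ "() {\n  return [\n"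
    ++ (p.2.map (fun filename => "    '" ++ p.1 ++ "/" ++ filename ++ "',\n")).foldr (· ++ ·) ""
    ++ "  ];\n}\n\n"

def spreadOf (p : String × List String) : String :=
  "    ..." ++ get_clean_chapter_name p.1 ++ "(),\n"

-- a string-appending foldl is the accumulator followed by the concatenation of the pieces
theorem foldl_str_append {α : Type} (f : String → α → String) (g : α → String)
    (h : ∀ a x, f a x = a ++ g x) :
    ∀ (xs : List α) (acc : String),
      xs.foldl f acc = acc ++ (xs.map g).foldr (· ++ ·) "" := by
  intro xs
  induction xs with
  | nil => intro acc; simp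
  | cons x xs ih =>
    intro acc
    simp only [List.foldl_cons, List.map_cons, List.foldr_cons, ih, h, String.append_assoc]

-- joining with the empty separator is plain concatenation
theorem str_join_empty : ∀ (l : List String),
    PySem.Str.join "" l = (l.foldr (· ++ ·) "") := by
  intro l
  induction l with
  | nil => rfl
  | cons s l ih =>
    cases l with
    | nil => simp [PySem.Str.join, PySem.Chars.join_singleton, String.ofList_toList]
    | cons t r =>
      apply String.toList_inj.mp
      have h := congrArg String.toList ih
      simp only [PySem.Str.join, List.map_cons, String.toList_ofList] at h ⊢
      rw [PySem.Chars.join_cons_cons]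
      simp only [List.foldr_cons, String.toList_append, h, List.append_assoc]
      simp

-- B's pair-building foldl produces exactly the two mapped lists
theorem foldl_two_lists {α : Type} (f g : α → String) :
    ∀ (xs : List α) (b s : List String),
      xs.foldl (fun (p : List String × List String) x => (p.1 ++ [f x], p.2 ++ [g x])) (b, s)
        = (b ++ xs.map f, s ++ xs.map g) := by
  intro xs
  induction xs with
  | nil => intro b s; simp
  | cons x xs ih => intro b s; simp [ih]

-- A in closed form (under unique keys)
theorem a_closed (st : List (String × List String)) (dir : String)
    (hnd : (st.map Prod.fst).Nodup) :
    create_js_content st dir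
      = "// One method per module\n"
        ++ (st.map blockOf).foldr (· ++ ·) ""
        ++ "function formation() {\n  return [\n"
        ++ (st.map spreadOf).foldr (· ++ ·) ""
        ++ "  ].map(slidePath => {\n    return { path: slidePath };\n  });\n}\n\nexport function usedSlides() {\n  return formation();\n}\n" := by
  unfold create_js_content
  dsimp only
  have hndk : (PySem.Dict.mk st).keys.Nodup := by rw [PySem.Dict.keys_mk]; exact hnd
  have hlook : ∀ p ∈ st, (PySem.Dict.mk st).getD p.1 [] = p.2 := fun p hp =>
    PySem.Dict.getD_of_mem_items _ (by simpa using hp) hndk []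
  rw [PySem.Dict.keys_mk, List.foldl_map, List.foldl_map]
  have e1 : ∀ acc : String, List.foldl (fun (acc : String) (p : String × List String) =>
      (List.foldl (fun a filename => a ++ "    '" ++ p.1 ++ "/" ++ filename ++ "',\n")
        (acc ++ "function " ++ get_clean_chapter_name p.1 ++ "() {\n  return [\n")
        ((PySem.Dict.mk st).getD p.1 [])) ++ "  ];\n}\n\n") acc st
      = acc ++ (st.map blockOf).foldr (· ++ ·) "" := by
    intro acc
    rw [PySem.List.foldl_congr_mem st _
        (fun (acc : String) (p : String × List String) =>
          (List.foldl (fun a filename => a ++ "    '" ++ p.1 ++ "/" ++ filename ++ "',\n")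
            (acc ++ "function " ++ get_clean_chapter_name p.1 ++ "() {\n  return [\n") p.2)
          ++ "  ];\n}\n\n")
        acc (fun acc p hp => by rw [hlook p hp])]
    exact foldl_str_append _ blockOf (fun a p => by
      rw [foldl_str_append (fun a filename => a ++ "    '" ++ p.1 ++ "/" ++ filename ++ "',\n")
            (fun filename => "    '" ++ p.1 ++ "/" ++ filename ++ "',\n")
            (fun a x => by simp [String.append_assoc])]
      simp [blockOf, String.append_assoc]) st acc
  have e2 : ∀ acc : String, List.foldl (fun (acc : String) (p : String × List String) =>
        acc ++ "    ..." ++ get_clean_chapter_name p.1 ++ "(),\n") acc st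
      = acc ++ (st.map spreadOf).foldr (· ++ ·) "" :=
    fun acc => foldl_str_append _ spreadOf
      (fun a p => by simp [spreadOf, String.append_assoc]) st acc
  rw [e1, e2]

-- B in closed form
theorem b_closed (st : List (String × List String)) (dir : String) :
    create_js_content_alt st dir
      = "// One method per module\n"
        ++ (st.map blockOf).foldr (· ++ ·) ""
        ++ "function formation() {\n  return [\n"
        ++ (st.map spreadOf).foldr (· ++ ·) ""
        ++ "  ].map(slidePath => {\n    return { path: slidePath };\n  });\n}\n\nexport function usedSlides() {\n  return formation();\n}\n" := by
  unfold create_js_content_alt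
  dsimp only
  rw [foldl_two_lists
      (fun cf => "function " ++ String.ofList (PySem.List.pyGetD (PySem.Chars.splitOn cf.1.toList ['-']) 1 [] ++
          PySem.Chars.join [] ((PySem.List.slice (PySem.Chars.splitOn cf.1.toList ['-']) (some 2) none).map pyCapitalize))
          ++ "() {\n  return [\n"
          ++ PySem.Str.join "" (cf.2.map (fun filename => "    '" ++ cf.1 ++ "/" ++ filename ++ "',\n"))
          ++ "  ];\n}\n\n")
      (fun cf => "    ..." ++ String.ofList (PySem.List.pyGetD (PySem.Chars.splitOn cf.1.toList ['-']) 1 [] ++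
          PySem.Chars.join [] ((PySem.List.slice (PySem.Chars.splitOn cf.1.toList ['-']) (some 2) none).map pyCapitalize))
          ++ "(),\n")
      st [] []]
  have hb : ∀ p : String × List String,
      ("function " ++ String.ofList (PySem.List.pyGetD (PySem.Chars.splitOn p.1.toList ['-']) 1 [] ++
          PySem.Chars.join [] ((PySem.List.slice (PySem.Chars.splitOn p.1.toList ['-']) (some 2) none).map pyCapitalize))
          ++ "() {\n  return [\n"
          ++ PySem.Str.join "" (p.2.map (fun filename => "    '" ++ p.1 ++ "/" ++ filename ++ "',\n"))
          ++ "  ];\n}\n\n") = blockOf p := by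
    intro p
    rw [str_join_empty]
    simp [blockOf, get_clean_chapter_name, String.append_assoc]
  have hs : ∀ p : String × List String,
      ("    ..." ++ String.ofList (PySem.List.pyGetD (PySem.Chars.splitOn p.1.toList ['-']) 1 [] ++
          PySem.Chars.join [] ((PySem.List.slice (PySem.Chars.splitOn p.1.toList ['-']) (some 2) none).map pyCapitalize))
          ++ "(),\n") = spreadOf p := by
    intro p
    simp [spreadOf, get_clean_chapter_name, String.append_assoc]
  simp only [List.nil_append]
  simp only [hb, hs]
  simp only [str_join_empty, String.append_assoc]

-- ===== VERDICT (by name: the statement is the Claim_ definition above) =====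
theorem create_js_content_spec : Claim_equal_create_js_content := by
  intro st dir _ hpre
  unfold Spec_create_js_content
  rw [a_closed st dir hpre.1, b_closed st dir]
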